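-- pv_equiv track=rewrite | github.com/CHATGITGPTT/World | agents/sales_agent/modes/market_intelligence.py | _summarize_market_data
-- ===== SOURCE A (Python) =====
-- from typing import List, Dict, Any, Optional
--
-- def _summarize_market_data(market_data: List[Dict[str, Any]]) -> str:
--     """Create concise summary of market data for prompt."""
--     if not market_data:
--         return "No data available"
--
--     # Group data by source
--     sources = {}
--     for item in market_data:
--         source = item.get('source', 'Unknown')
--         if source not in sources:
--             sources[source] = []
--         sources[source].append(item)
--
--     summary_parts = []
--     for source, items in sources.items():
--         sample_titles = [item.get('title', '')[:100] for item in items[:3]]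
--         summary_parts.append(f"{source} ({len(items)} items): {'; '.join(sample_titles)}")
--
--     return '\n'.join(summary_parts)
-- ===== SOURCE B (Python) =====
-- def _summarize_market_data(market_data):
--     """One-pass summary: keep only (count, <=3 sample titles) per source."""
--     if not market_data:
--         return "No data available"
--
--     acc = {}
--     for item in market_data:
--         source = item.get('source', 'Unknown')
--         count, samples = acc.get(source, (0, []))
--         if len(samples) < 3:
--             samples = samples + [item.get('title', '')[:100]]
--         acc[source] = (count + 1, samples)
--
--     return '\n'.join(
--         f"{source} ({count} items): {'; '.join(samples)}"
--         for source, (count, samples) in acc.items()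
--     )
-- ===== Notes on version B (the rewrite author's own statement) =====
-- stated objective: alternative
-- what changed: Replaces the group-then-summarize two-pass shape (building full per-source item lists, then a second pass slicing each) with a single fold that maintains only a count and at most three truncated sample titles per source.
import Mathlib
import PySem

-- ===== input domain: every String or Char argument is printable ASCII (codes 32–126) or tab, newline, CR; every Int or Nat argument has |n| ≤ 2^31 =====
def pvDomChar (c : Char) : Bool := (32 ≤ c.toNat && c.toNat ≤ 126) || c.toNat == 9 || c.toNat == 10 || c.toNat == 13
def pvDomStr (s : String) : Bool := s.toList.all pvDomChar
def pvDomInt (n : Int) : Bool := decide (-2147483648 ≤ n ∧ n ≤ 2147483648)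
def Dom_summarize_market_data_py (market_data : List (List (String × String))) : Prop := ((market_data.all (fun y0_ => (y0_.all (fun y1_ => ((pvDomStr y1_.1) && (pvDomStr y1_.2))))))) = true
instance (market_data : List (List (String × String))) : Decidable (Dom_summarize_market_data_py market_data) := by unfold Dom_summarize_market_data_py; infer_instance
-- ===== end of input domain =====

-- B replaces A's group-then-summarize two-pass shape with a single fold keeping only
-- (count, ≤3 truncated sample titles) per source; equal output, similar cost (objective: alternative).


-- item.get(k, dflt) on a dict argument (assoc list, first match)
def pvItemGet (item : List (String × String)) (k dflt : String) : String :=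
  (PySem.Dict.mk item).getD k dflt

-- ===== PORT A =====
-- sources[source].append(item) is ported as an in-place overwrite via Dict.modify
def summarize_market_data_py (market_data : List (List (String × String))) : String :=
  if market_data = [] then "No data available"
  else
    let sources : PySem.Dict String (List (List (String × String))) :=
      market_data.foldl (fun d item =>
        let source := pvItemGet item "source" "Unknown"
        let d := if d.contains source then d else d.insert source []
        d.modify source [] (fun xs => xs ++ [item])) PySem.Dict.empty
    let summary_parts : List String :=
      sources.items.map (fun p =>
        let sample_titles :=
          (PySem.List.slice p.2 none (some 3)).map
            (fun it => PySem.Str.slice (pvItemGet it "title" "") none (some 100))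
        p.1 ++ " (" ++ PySem.Int.toStr (p.2.length : Int) ++ " items): " ++
          PySem.Str.join "; " sample_titles)
    PySem.Str.join "\n" summary_parts

-- ===== PORT B =====
def summarize_market_data_py_alt (market_data : List (List (String × String))) : String :=
  if market_data = [] then "No data available"
  else
    let acc : PySem.Dict String (Int × List String) :=
      market_data.foldl (fun d item =>
        let source := pvItemGet item "source" "Unknown"
        let cs := d.getD source (0, [])
        let samples :=
          if cs.2.length < 3 then
            cs.2 ++ [PySem.Str.slice (pvItemGet item "title" "") none (some 100)]
          else cs.2
        d.insert source (cs.1 + 1, samples)) PySem.Dict.empty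
    PySem.Str.join "\n" (acc.items.map (fun p =>
      p.1 ++ " (" ++ PySem.Int.toStr p.2.1 ++ " items): " ++ PySem.Str.join "; " p.2.2))

-- ===== PRECONDITION & SPEC =====
def Spec_summarize_market_data_py (market_data : List (List (String × String))) (out : String) : Prop := out = summarize_market_data_py_alt market_data
instance (market_data : List (List (String × String))) (out : String) : Decidable (Spec_summarize_market_data_py market_data out) := by unfold Spec_summarize_market_data_py; infer_instance

-- ===== CLAIM (what is proved, stated in full; the proofs are below) =====
def Claim_equal_summarize_market_data_py : Prop := ∀ (market_data : List (List (String × String))), Dom_summarize_market_data_py market_data → Spec_summarize_market_data_py market_data (summarize_market_data_py market_data)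

-- ===== LEMMAS AND PROOFS =====

-- the truncated title of one item
def pvTf (it : List (String × String)) : String :=
  PySem.Str.slice (pvItemGet it "title" "") none (some 100)

-- B's per-source record as a function of A's per-source item list
def pvG (v : List (List (String × String))) : Int × List String :=
  ((v.length : Int), (v.take 3).map pvTf)

def pvStepA (d : PySem.Dict String (List (List (String × String))))
    (item : List (String × String)) : PySem.Dict String (List (List (String × String))) :=
  let source := pvItemGet item "source" "Unknown"
  let d := if d.contains source then d else d.insert source []
  d.modify source [] (fun xs => xs ++ [item])

def pvStepB (d : PySem.Dict String (Int × List String))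
    (item : List (String × String)) : PySem.Dict String (Int × List String) :=
  let source := pvItemGet item "source" "Unknown"
  let cs := d.getD source (0, [])
  let samples :=
    if cs.2.length < 3 then cs.2 ++ [pvTf item] else cs.2
  d.insert source (cs.1 + 1, samples)

def pvMapF (l : List (String × List (List (String × String)))) :
    List (String × (Int × List String)) :=
  l.map (fun p => (p.1, pvG p.2))

lemma pv_items_mk {k v : Type} (l : List (k × v)) : (PySem.Dict.mk l).items = l := rfl

lemma pv_get?_map (l : List (String × List (List (String × String)))) (s : String) :
    (PySem.Dict.mk (pvMapF l)).get? s = ((PySem.Dict.mk l).get? s).map pvG := by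
  induction l with
  | nil => rfl
  | cons p rest ih =>
    rw [show pvMapF (p :: rest) = (p.1, pvG p.2) :: pvMapF rest from rfl,
      PySem.Dict.get?_mk_cons, PySem.Dict.get?_mk_cons]
    by_cases h : p.1 == s
    · simp [h]
    · simp only [h, if_false, Bool.false_eq_true, ih]

lemma pv_contains_map (l : List (String × List (List (String × String)))) (s : String) :
    (PySem.Dict.mk (pvMapF l)).contains s = (PySem.Dict.mk l).contains s := by
  rw [PySem.Dict.contains_eq_isSome_get?, PySem.Dict.contains_eq_isSome_get?, pv_get?_map]
  cases (PySem.Dict.mk l).get? s <;> simp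

lemma pv_take3_append (v : List (List (String × String))) (x : List (String × String)) :
    (v ++ [x]).take 3 = if v.length < 3 then v.take 3 ++ [x] else v.take 3 := by
  split_ifs with h
  · rw [List.take_of_length_le (show (v ++ [x]).length ≤ 3 by simp; omega),
      List.take_of_length_le (show v.length ≤ 3 by omega)]
  · exact List.take_append_of_le_length (by omega)

lemma pv_step_comm (l : List (String × List (List (String × String))))
    (item : List (String × String)) :
    pvStepB (PySem.Dict.mk (pvMapF l)) item =
      PySem.Dict.mk (pvMapF (pvStepA (PySem.Dict.mk l) item).items) := by
  set s := pvItemGet item "source" "Unknown" with hs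
  by_cases hc : (PySem.Dict.mk l).contains s = true
  · -- existing source: overwrite in place
    have hcB : (PySem.Dict.mk (pvMapF l)).contains s = true := by
      rw [pv_contains_map]; exact hc
    obtain ⟨v, hv⟩ : ∃ v, (PySem.Dict.mk l).get? s = some v := by
      rw [PySem.Dict.contains_eq_isSome_get?] at hc
      exact Option.isSome_iff_exists.mp hc
    have hgA : (PySem.Dict.mk l).getD s [] = v :=
      PySem.Dict.getD_of_get?_eq_some _ _ hv
    have hgB : (PySem.Dict.mk (pvMapF l)).getD s (0, []) = pvG v := by
      rw [PySem.Dict.getD_eq_get?_getD, pv_get?_map, hv]; rfl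
    have hlen : ((v.take 3).map pvTf).length < 3 ↔ v.length < 3 := by
      simp [List.length_take]
    show (PySem.Dict.mk (pvMapF l)).insert s _ = _
    unfold pvStepA
    simp only [← hs, hc, if_true, PySem.Dict.modify, hgA, hgB]
    apply PySem.Dict.ext
    rw [PySem.Dict.items_insert_of_contains _ _ hcB,
      PySem.Dict.items_insert_of_contains _ _ hc, pv_items_mk]
    simp only [pvMapF, List.map_map]
    apply List.map_congr_left
    intro p _
    by_cases hps : p.1 == s
    · have hval : (if ((pvG v).2).length < 3
          then (pvG v).2 ++ [pvTf item] else (pvG v).2)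
          = ((v ++ [item]).take 3).map pvTf := by
        show (if ((v.take 3).map pvTf).length < 3
          then (v.take 3).map pvTf ++ [pvTf item] else (v.take 3).map pvTf) = _
        rw [pv_take3_append]
        split_ifs with h1 h2 h2
        · simp
        · exact absurd (hlen.mp h1) h2
        · exact absurd (hlen.mpr h2) h1
        · rfl
      simp only [Function.comp, hps, if_true]
      rw [hval]
      simp [pvG]
    · simp [Function.comp, hps]
  · -- new source: key appended
    have hc' : (PySem.Dict.mk l).contains s = false := by
      cases hcc : (PySem.Dict.mk l).contains s with
      | false => rfl
      | true => exact absurd hcc hc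
    have hcB : (PySem.Dict.mk (pvMapF l)).contains s = false := by
      rw [pv_contains_map]; exact hc'
    have hgB : (PySem.Dict.mk (pvMapF l)).getD s (0, []) = (0, []) :=
      PySem.Dict.getD_of_not_contains _ _ hcB
    have hins : ((PySem.Dict.mk l).insert s []).contains s = true :=
      PySem.Dict.contains_insert_self _ _ _
    have hgA : ((PySem.Dict.mk l).insert s []).getD s [] = [] :=
      PySem.Dict.getD_insert_self _ _ _ _
    show (PySem.Dict.mk (pvMapF l)).insert s _ = _
    unfold pvStepA
    simp only [← hs, hc', if_false, Bool.false_eq_true, PySem.Dict.modify, hgA, hgB]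
    apply PySem.Dict.ext
    rw [PySem.Dict.items_insert_of_not_contains _ _ hcB,
      PySem.Dict.items_insert_of_contains _ _ hins,
      PySem.Dict.items_insert_of_not_contains _ _ hc', pv_items_mk]
    simp only [pvMapF, List.map_map, List.map_append, List.nil_append]
    congr 1
    · apply List.map_congr_left
      intro p hp
      have hmem : p.1 ∈ (PySem.Dict.mk l).keys := PySem.Dict.mem_keys_of_mem_items _ hp
      have hps : (p.1 == s) = false := by
        cases hcc : (p.1 == s) with
        | false => rfl
        | true =>
          have he : p.1 = s := by simpa using hcc
          have h2 : (PySem.Dict.mk l).contains s = true :=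
            (PySem.Dict.contains_iff_mem_keys _ _).mpr (he ▸ hmem)
          rw [hc'] at h2; exact absurd h2 (by simp)
      simp [Function.comp, hps]
    · simp [pvG, pvTf]

lemma pv_fold_comm (xs : List (List (String × String)))
    (l : List (String × List (List (String × String)))) :
    xs.foldl pvStepB (PySem.Dict.mk (pvMapF l)) =
      PySem.Dict.mk (pvMapF (xs.foldl pvStepA (PySem.Dict.mk l)).items) := by
  induction xs generalizing l with
  | nil => rfl
  | cons x rest ih =>
    simp only [List.foldl_cons]
    rw [pv_step_comm]
    have hmk : (rest.foldl pvStepA (pvStepA (PySem.Dict.mk l) x)) =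
        (rest.foldl pvStepA (PySem.Dict.mk (pvStepA (PySem.Dict.mk l) x).items)) := rfl
    rw [ih (pvStepA (PySem.Dict.mk l) x).items, ← hmk]

lemma pv_lines (l : List (String × List (List (String × String)))) :
    (pvMapF l).map (fun p =>
        p.1 ++ " (" ++ PySem.Int.toStr p.2.1 ++ " items): " ++ PySem.Str.join "; " p.2.2)
      = l.map (fun p =>
        p.1 ++ " (" ++ PySem.Int.toStr (p.2.length : Int) ++ " items): " ++
          PySem.Str.join "; " ((PySem.List.slice p.2 none (some 3)).map
            (fun it => PySem.Str.slice (pvItemGet it "title" "") none (some 100)))) := by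
  simp only [pvMapF, List.map_map]
  apply List.map_congr_left
  intro p _
  have hsl : PySem.List.slice p.2 none (some 3) = p.2.take 3 := by simp [pysem]
  have hT : pvTf = fun it => PySem.Str.slice (pvItemGet it "title" "") none (some 100) := rfl
  simp [Function.comp, pvG, hT, hsl, List.map_take]

-- ===== VERDICT (by name: the statement is the Claim_ definition above) =====
theorem summarize_market_data_py_spec : Claim_equal_summarize_market_data_py := by
  intro md _
  show summarize_market_data_py md = summarize_market_data_py_alt md
  unfold summarize_market_data_py summarize_market_data_py_alt
  by_cases h : md = []
  · simp [h]
  · simp only [h, if_false]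
    have hfoldA : ∀ (d : PySem.Dict String (List (List (String × String)))),
        md.foldl (fun d item =>
          let source := pvItemGet item "source" "Unknown"
          let d := if d.contains source then d else d.insert source []
          d.modify source [] (fun xs => xs ++ [item])) d = md.foldl pvStepA d := by
      intro d; rfl
    have hfoldB : ∀ (d : PySem.Dict String (Int × List String)),
        md.foldl (fun d item =>
          let source := pvItemGet item "source" "Unknown"
          let cs := d.getD source (0, [])
          let samples :=
            if cs.2.length < 3 then
              cs.2 ++ [PySem.Str.slice (pvItemGet item "title" "") none (some 100)]
            else cs.2
          d.insert source (cs.1 + 1, samples)) d = md.foldl pvStepB d := by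
      intro d; rfl
    rw [hfoldA, hfoldB]
    have h0 : (PySem.Dict.empty : PySem.Dict String (Int × List String)) =
        PySem.Dict.mk (pvMapF []) := rfl
    rw [h0, pv_fold_comm md []]
    have h1 : (PySem.Dict.mk ([] : List (String × List (List (String × String))))) =
        (PySem.Dict.empty : PySem.Dict String (List (List (String × String)))) := rfl
    rw [h1]
    congr 1
    rw [pv_items_mk]
    exact (pv_lines _).symm
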